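-- pv_equiv track=rewrite | github.com/EyupKeremBas7/server-client | Klasik_Kripto/hill.py | _ters_matris_3x3
-- ===== SOURCE A (Python) =====
-- def _mod_tersi(a, m):
--     """Modüler ters hesaplama (Extended Euclidean Algorithm)"""
--     def extended_gcd(a, b):
--         if a == 0:
--             return b, 0, 1
--         gcd, x1, y1 = extended_gcd(b % a, a)
--         x = y1 - (b // a) * x1
--         y = x1
--         return gcd, x, y
--
--     gcd, x, _ = extended_gcd(a % m, m)
--     if gcd != 1:
--         return None  # Modüler ters yok
--     return (x % m + m) % m
--
-- def _determinant_2x2(matris):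
--     """2x2 matris determinantı"""
--     return matris[0][0] * matris[1][1] - matris[0][1] * matris[1][0]
--
-- def _determinant_3x3(matris):
--     """3x3 matris determinantı"""
--     return (matris[0][0] * (matris[1][1] * matris[2][2] - matris[1][2] * matris[2][1])
--             - matris[0][1] * (matris[1][0] * matris[2][2] - matris[1][2] * matris[2][0])
--             + matris[0][2] * (matris[1][0] * matris[2][1] - matris[1][1] * matris[2][0]))
--
-- def _ters_matris_3x3(matris):
--     """3x3 matrisin mod 26 tersi"""
--     det = _determinant_3x3(matris) % 26
--     det_tersi = _mod_tersi(det, 26)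
--
--     if det_tersi is None:
--         return None
--
--     # Kofaktör matrisi hesapla
--     kofaktor = [[0, 0, 0], [0, 0, 0], [0, 0, 0]]
--
--     for i in range(3):
--         for j in range(3):
--             # 2x2 minor matris
--             minor = []
--             for mi in range(3):
--                 if mi == i:
--                     continue
--                 satir = []
--                 for mj in range(3):
--                     if mj == j:
--                         continue
--                     satir.append(matris[mi][mj])
--                 minor.append(satir)
--
--             kofaktor[i][j] = ((-1) ** (i + j)) * _determinant_2x2(minor)
--
--     # Adjoint (kofaktörün transpozu)
--     adjoint = [[0, 0, 0], [0, 0, 0], [0, 0, 0]]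
--     for i in range(3):
--         for j in range(3):
--             adjoint[i][j] = kofaktor[j][i]
--
--     # Ters matris
--     ters = [[0, 0, 0], [0, 0, 0], [0, 0, 0]]
--     for i in range(3):
--         for j in range(3):
--             ters[i][j] = (adjoint[i][j] * det_tersi) % 26
--
--     return ters
-- ===== SOURCE B (Python) =====
-- def _mod_tersi(a, m):
--     """Moduler ters hesaplama (Extended Euclidean Algorithm)"""
--     def extended_gcd(a, b):
--         if a == 0:
--             return b, 0, 1
--         gcd, x1, y1 = extended_gcd(b % a, a)
--         x = y1 - (b // a) * x1
--         y = x1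
--         return gcd, x, y
--
--     gcd, x, _ = extended_gcd(a % m, m)
--     if gcd != 1:
--         return None
--     return (x % m + m) % m
--
--
-- def _ters_matris_3x3(matris):
--     """3x3 matrisin mod 26 tersi -- dokuz giris dogrudan kapali formda (adjugate), ara matris yok"""
--     a, b, c = matris[0][0], matris[0][1], matris[0][2]
--     d, e, f = matris[1][0], matris[1][1], matris[1][2]
--     g, h, i = matris[2][0], matris[2][1], matris[2][2]
--     det = (a * (e * i - f * h) - b * (d * i - f * g) + c * (d * h - e * g)) % 26
--     t = _mod_tersi(det, 26)
--     if t is None: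
--         return None
--     return [
--         [(e * i - f * h) * t % 26, (c * h - b * i) * t % 26, (b * f - c * e) * t % 26],
--         [(f * g - d * i) * t % 26, (a * i - c * g) * t % 26, (c * d - a * f) * t % 26],
--         [(d * h - e * g) * t % 26, (b * g - a * h) * t % 26, (a * e - b * d) * t % 26],
--     ]
-- ===== Notes on version B (the rewrite author's own statement) =====
-- stated objective: simpler
-- what changed: Replaces A's three nested loop passes (minor construction with mi/mj skip loops, cofactor matrix, transpose, entrywise mod pass) by nine explicit closed-form adjugate entries written directly in transposed orientation.
import Mathlib
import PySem

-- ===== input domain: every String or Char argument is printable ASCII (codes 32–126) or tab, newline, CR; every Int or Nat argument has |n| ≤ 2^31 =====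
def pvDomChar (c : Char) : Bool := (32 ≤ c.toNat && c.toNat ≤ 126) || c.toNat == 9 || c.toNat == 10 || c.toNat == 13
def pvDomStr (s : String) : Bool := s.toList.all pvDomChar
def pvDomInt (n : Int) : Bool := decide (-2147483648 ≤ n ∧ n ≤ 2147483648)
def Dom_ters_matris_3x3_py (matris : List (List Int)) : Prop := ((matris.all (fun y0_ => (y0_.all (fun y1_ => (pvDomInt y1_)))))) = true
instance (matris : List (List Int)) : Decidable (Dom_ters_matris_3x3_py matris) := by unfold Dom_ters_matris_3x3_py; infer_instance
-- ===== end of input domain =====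

-- B replaces A's nested cofactor/minor/transpose loops by nine closed-form adjugate entries (objective: simpler).

-- ===== PORT A =====
-- shared module helper _mod_tersi (extended Euclid); fuel only makes the recursion total,
-- 64 steps far exceed the depth reachable from any call with m = 26
def pvExtGcd : Nat → Int → Int → Int × Int × Int
  | 0, _, b => (b, 0, 1)
  | Nat.succ fuel, a, b =>
    if a = 0 then (b, 0, 1)
    else
      let r := pvExtGcd fuel (PySem.Int.mod b a) a
      (r.1, r.2.2 - (PySem.Int.floordiv b a) * r.2.1, r.2.1)

def pvModTersi (a m : Int) : Option Int :=
  let r := pvExtGcd 64 (PySem.Int.mod a m) m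
  if r.1 ≠ 1 then none
  else some (PySem.Int.mod (PySem.Int.mod r.2.1 m + m) m)

-- matris[i][j] with literal nonnegative in-range indices (Pre_ guarantees the range; exact there)
def pvAt (m : List (List Int)) (i j : Nat) : Int := (m.getD i []).getD j 0

def pvDet2 (m : List (List Int)) : Int :=
  pvAt m 0 0 * pvAt m 1 1 - pvAt m 0 1 * pvAt m 1 0

def pvDet3 (m : List (List Int)) : Int :=
  pvAt m 0 0 * (pvAt m 1 1 * pvAt m 2 2 - pvAt m 1 2 * pvAt m 2 1)
    - pvAt m 0 1 * (pvAt m 1 0 * pvAt m 2 2 - pvAt m 1 2 * pvAt m 2 0)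
    + pvAt m 0 2 * (pvAt m 1 0 * pvAt m 2 1 - pvAt m 1 1 * pvAt m 2 0)

def ters_matris_3x3_py (matris : List (List Int)) : Option (List (List Int)) :=
  let det := PySem.Int.mod (pvDet3 matris) 26
  match pvModTersi det 26 with
  | none => none
  | some detTersi =>
    -- kofaktör: the mi/mj loops with `continue` build the 2x2 minor of (i, j)
    let kofaktor := (PySem.List.pyRange 0 3 1).map (fun i =>
      (PySem.List.pyRange 0 3 1).map (fun j =>
        let minor := ((PySem.List.pyRange 0 3 1).filter (fun mi => mi ≠ i)).map (fun mi =>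
          ((PySem.List.pyRange 0 3 1).filter (fun mj => mj ≠ j)).map (fun mj =>
            pvAt matris mi.toNat mj.toNat))
        ((-1 : Int)) ^ (i + j).toNat * pvDet2 minor))
    let adjoint := (PySem.List.pyRange 0 3 1).map (fun i =>
      (PySem.List.pyRange 0 3 1).map (fun j => pvAt kofaktor j.toNat i.toNat))
    let ters := adjoint.map (fun row => row.map (fun x => PySem.Int.mod (x * detTersi) 26))
    some ters

-- ===== PORT B =====
def ters_matris_3x3_py_alt (matris : List (List Int)) : Option (List (List Int)) :=
  let a := pvAt matris 0 0; let b := pvAt matris 0 1; let c := pvAt matris 0 2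
  let d := pvAt matris 1 0; let e := pvAt matris 1 1; let f := pvAt matris 1 2
  let g := pvAt matris 2 0; let h := pvAt matris 2 1; let i := pvAt matris 2 2
  let det := PySem.Int.mod (a * (e * i - f * h) - b * (d * i - f * g) + c * (d * h - e * g)) 26
  match pvModTersi det 26 with
  | none => none
  | some t =>
    some [
      [PySem.Int.mod ((e * i - f * h) * t) 26, PySem.Int.mod ((c * h - b * i) * t) 26,
       PySem.Int.mod ((b * f - c * e) * t) 26],
      [PySem.Int.mod ((f * g - d * i) * t) 26, PySem.Int.mod ((a * i - c * g) * t) 26,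
       PySem.Int.mod ((c * d - a * f) * t) 26],
      [PySem.Int.mod ((d * h - e * g) * t) 26, PySem.Int.mod ((b * g - a * h) * t) 26,
       PySem.Int.mod ((a * e - b * d) * t) 26]]

-- ===== PRECONDITION & SPEC =====
-- Pre_ excludes matrices lacking a full 3x3 upper-left block, on which Python A raises IndexError.
def Pre_ters_matris_3x3_py (matris : List (List Int)) : Prop :=
  3 ≤ matris.length ∧ ∀ r ∈ matris.take 3, 3 ≤ r.length
instance (matris : List (List Int)) : Decidable (Pre_ters_matris_3x3_py matris) := by
  unfold Pre_ters_matris_3x3_py; infer_instance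

def pvWitness_ters_matris_3x3_py : List (List Int) := [[1, 0, 0], [0, 1, 0], [0, 0, 1]]

def Spec_ters_matris_3x3_py (matris : List (List Int)) (out : Option (List (List Int))) : Prop := out = ters_matris_3x3_py_alt matris
instance (matris : List (List Int)) (out : Option (List (List Int))) : Decidable (Spec_ters_matris_3x3_py matris out) := by unfold Spec_ters_matris_3x3_py; infer_instance

-- ===== CLAIM (what is proved, stated in full; the proofs are below) =====
def Claim_equal_ters_matris_3x3_py : Prop := ∀ (matris : List (List Int)), Dom_ters_matris_3x3_py matris → Pre_ters_matris_3x3_py matris → Spec_ters_matris_3x3_py matris (ters_matris_3x3_py matris)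

-- ===== LEMMAS AND PROOFS =====

-- ===== VERDICT (by name: the statement is the Claim_ definition above) =====
theorem ters_matris_3x3_py_spec : Claim_equal_ters_matris_3x3_py := by
  intro matris _ _
  have hR : PySem.List.pyRange 0 3 1 = [0, 1, 2] := by decide
  unfold Spec_ters_matris_3x3_py
  simp only [ters_matris_3x3_py, ters_matris_3x3_py_alt, pvDet3]
  cases pvModTersi (PySem.Int.mod (pvAt matris 0 0 * (pvAt matris 1 1 * pvAt matris 2 2 - pvAt matris 1 2 * pvAt matris 2 1) - pvAt matris 0 1 * (pvAt matris 1 0 * pvAt matris 2 2 - pvAt matris 1 2 * pvAt matris 2 0) + pvAt matris 0 2 * (pvAt matris 1 0 * pvAt matris 2 1 - pvAt matris 1 1 * pvAt matris 2 0)) 26) 26 with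
  | none => rfl
  | some t =>
    simp only [hR, pvDet2]
    simp [pvAt]
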